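-- pv_equiv track=rewrite | github.com/WongQiyu/Leetcode-Practices | coderpad/maximize bankruptcy.py | get_biggest_loss
-- ===== SOURCE A (Python) =====
-- def get_biggest_loss(prices):
--     max_val = 0
--     min_diff = 0
--     for item in prices:
--         diff = item - max_val
--         if diff < min_diff:
--             min_diff = diff
--         if item > max_val:
--             max_val = item
--     return min_diff
-- ===== SOURCE B (Python) =====
-- def get_biggest_loss(prices):
--     # pass 1: running max table, running_max[i] = max(0, prices[0..i-1])
--     running_max = [0]
--     for p in prices:
--         running_max.append(max(running_max[-1], p))
--     # pass 2: most negative drop, floored at 0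
--     return min([0] + [p - m for p, m in zip(prices, running_max)])
-- ===== Notes on version B (the rewrite author's own statement) =====
-- stated objective: alternative
-- what changed: Replaces the single interleaved running-max/min-diff loop with two passes: first build a prefix running-maximum table (seeded with 0), then take the minimum of the per-element drops together with 0.
import Mathlib
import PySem

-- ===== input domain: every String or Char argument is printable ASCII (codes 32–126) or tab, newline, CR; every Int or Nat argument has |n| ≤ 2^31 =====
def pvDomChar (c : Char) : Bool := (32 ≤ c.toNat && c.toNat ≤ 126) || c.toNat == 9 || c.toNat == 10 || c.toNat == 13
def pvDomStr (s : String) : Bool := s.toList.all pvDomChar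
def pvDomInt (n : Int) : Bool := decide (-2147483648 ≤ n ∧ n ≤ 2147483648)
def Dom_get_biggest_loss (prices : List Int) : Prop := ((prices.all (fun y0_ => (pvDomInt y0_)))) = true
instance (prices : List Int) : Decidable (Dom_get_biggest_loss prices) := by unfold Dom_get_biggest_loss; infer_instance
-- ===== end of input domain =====

-- B replaces A's interleaved running-max/min-diff loop by a two-pass decomposition:
-- build the prefix running-maximum table, then take the minimum of per-element drops with 0.

-- ===== PORT A =====
def get_biggest_loss (prices : List Int) : Int :=
  (prices.foldl (fun st item =>
      let diff := item - st.1
      let min_diff := if diff < st.2 then diff else st.2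
      let max_val := if item > st.1 then item else st.1
      (max_val, min_diff)) ((0 : Int), (0 : Int))).2

-- ===== PORT B =====
-- running-max table (excluding the leading seed, which B prepends below)
def rmTable (m : Int) : List Int → List Int
  | [] => []
  | p :: rest => max m p :: rmTable (max m p) rest

def get_biggest_loss_alt (prices : List Int) : Int :=
  let running_max : List Int := 0 :: rmTable 0 prices
  ((prices.zip running_max).map (fun pm => pm.1 - pm.2)).foldl min 0

-- ===== PRECONDITION & SPEC =====
def Spec_get_biggest_loss (prices : List Int) (out : Int) : Prop := out = get_biggest_loss_alt prices
instance (prices : List Int) (out : Int) : Decidable (Spec_get_biggest_loss prices out) := by unfold Spec_get_biggest_loss; infer_instance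

-- ===== CLAIM (what is proved, stated in full; the proofs are below) =====
def Claim_equal_get_biggest_loss : Prop := ∀ (prices : List Int), Dom_get_biggest_loss prices → Spec_get_biggest_loss prices (get_biggest_loss prices)

-- ===== LEMMAS AND PROOFS =====

theorem foldA_eq (prices : List Int) : ∀ (m d : Int),
    (prices.foldl (fun st item =>
      let diff := item - st.1
      let min_diff := if diff < st.2 then diff else st.2
      let max_val := if item > st.1 then item else st.1
      (max_val, min_diff)) (m, d)).2
    = ((prices.zip (m :: rmTable m prices)).map (fun pm => pm.1 - pm.2)).foldl min d := by
  induction prices with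
  | nil => intro m d; rfl
  | cons p rest ih =>
    intro m d
    simp only [List.foldl, rmTable, List.zip_cons_cons, List.map]
    rw [ih]
    have h1 : (if p - m < d then p - m else d) = min d (p - m) := by
      simp [min_def]; omega
    have h2 : (if p > m then p else m) = max m p := by
      simp [max_def]; omega
    simp only [h1, h2]

-- ===== VERDICT (by name: the statement is the Claim_ definition above) =====
theorem get_biggest_loss_spec : Claim_equal_get_biggest_loss := by
  intro prices _
  unfold Spec_get_biggest_loss get_biggest_loss get_biggest_loss_alt
  exact foldA_eq prices 0 0
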